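-- pv_equiv track=rewrite | github.com/swayli94/lamkit | src/lamkit/layup/requirements.py | _check_groupings_of_same_orientation
-- ===== SOURCE A (Python) =====
-- from typing import Final, List, Tuple
--
-- def _check_groupings_of_same_orientation(half_layup_indices: List[int]) -> bool:
--     '''
--     Check the ply groupings requirements:
--
--     - Minimize groupings of plies with the same orientation,
--       e.g., stack no more than 4 plies of the same orientation together
--       to reduce or eliminate the fringe delamination.
--
--     Parameters
--     ------------------
--     half_layup_indices: List[int]
--         Layup sequence.
--     '''
--     is_valid = True
--
--     # Check for consecutive plies with same orientation
--     max_consecutive = 1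
--     current_consecutive = 1
--
--     for i in range(len(half_layup_indices)-1):
--         if half_layup_indices[i] == half_layup_indices[i+1]:
--             current_consecutive += 1
--             max_consecutive = max(max_consecutive, current_consecutive)
--         else:
--             current_consecutive = 1
--
--     # No more than 4 plies of the same orientation together
--     is_valid = max_consecutive <= 4
--
--     # Further check the symmetric plane, i.e.,
--     # the last three plies should not be the same orientation.
--     # Because this means the actual layup has at least 6 plies of the same orientation in the middle.
--     if len(half_layup_indices) >= 3:
--         if half_layup_indices[-3] == half_layup_indices[-2] == half_layup_indices[-1]:
--             is_valid = False
--
--     return is_valid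
-- ===== SOURCE B (Python) =====
-- def _check_groupings_of_same_orientation(half_layup_indices):
--     # Run-length encode the layup once, then judge from the run lengths.
--     runs = []  # (orientation, length) of each maximal run of equal plies
--     for x in half_layup_indices:
--         if runs and runs[-1][0] == x:
--             runs[-1] = (x, runs[-1][1] + 1)
--         else:
--             runs.append((x, 1))
--     lengths = [n for _, n in runs]
--     if any(n > 4 for n in lengths):
--         return False
--     if sum(lengths) >= 3 and lengths[-1] >= 3:
--         return False
--     return True
-- ===== Notes on version B (the rewrite author's own statement) =====
-- stated objective: alternative
-- what changed: B run-length-encodes the sequence once and judges validity from the list of run lengths (any run > 4, and a trailing run >= 3 when the layup has >= 3 plies), instead of A's index loop over adjacent pairs with two running counters plus a separate last-three-elements check.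
import Mathlib
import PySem

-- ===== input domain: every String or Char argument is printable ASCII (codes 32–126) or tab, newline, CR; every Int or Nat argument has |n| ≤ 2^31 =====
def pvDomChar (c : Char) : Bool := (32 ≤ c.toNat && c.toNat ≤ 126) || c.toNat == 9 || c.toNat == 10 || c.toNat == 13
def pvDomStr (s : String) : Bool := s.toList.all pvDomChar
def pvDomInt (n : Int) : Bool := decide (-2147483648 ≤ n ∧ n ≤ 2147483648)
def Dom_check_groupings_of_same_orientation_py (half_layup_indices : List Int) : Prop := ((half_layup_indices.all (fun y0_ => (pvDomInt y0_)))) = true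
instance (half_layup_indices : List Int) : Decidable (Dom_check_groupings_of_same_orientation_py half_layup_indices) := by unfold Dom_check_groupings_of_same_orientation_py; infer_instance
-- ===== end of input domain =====

-- B judges the layup from its run-length encoding instead of A's adjacent-pair counter loop; same O(n) cost, different decomposition.


-- ===== PORT A =====
def check_groupings_of_same_orientation_py (half_layup_indices : List Int) : Bool :=
  -- for i in range(len(xs)-1): two running counters (max_consecutive, current_consecutive)
  let st := (PySem.List.pyRange 0 (PySem.List.len half_layup_indices - 1) 1).foldl
    (fun (s : Int × Int) i =>
      if PySem.List.pyGetD half_layup_indices i 0 = PySem.List.pyGetD half_layup_indices (i + 1) 0 then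
        (max s.1 (s.2 + 1), s.2 + 1)
      else (s.1, 1)) (1, 1)
  let is_valid := decide (st.1 ≤ 4)
  if 3 ≤ half_layup_indices.length then
    if PySem.List.pyGetD half_layup_indices (-3) 0 = PySem.List.pyGetD half_layup_indices (-2) 0 ∧
       PySem.List.pyGetD half_layup_indices (-2) 0 = PySem.List.pyGetD half_layup_indices (-1) 0 then
      false
    else is_valid
  else is_valid

-- ===== PORT B =====
-- one step of B's loop: extend the last run or start a new one
def pvRunStep (runs : List (Int × Int)) (x : Int) : List (Int × Int) :=
  match runs.getLast? with
  | some (v, n) => if v = x then runs.dropLast ++ [(x, n + 1)] else runs ++ [(x, 1)]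
  | none => [(x, 1)]

def check_groupings_of_same_orientation_py_alt (half_layup_indices : List Int) : Bool :=
  let runs := half_layup_indices.foldl pvRunStep []
  let lengths : List Int := runs.map (·.2)
  if lengths.any (fun n => decide (4 < n)) then false
  -- lengths[-1]: in Python only reached when sum >= 3, hence lengths nonempty; pyGetD's default is unreachable
  else if 3 ≤ lengths.sum ∧ 3 ≤ PySem.List.pyGetD lengths (-1) 0 then false
  else true

-- ===== PRECONDITION & SPEC =====
def Spec_check_groupings_of_same_orientation_py (half_layup_indices : List Int) (out : Bool) : Prop := out = check_groupings_of_same_orientation_py_alt half_layup_indices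
instance (half_layup_indices : List Int) (out : Bool) : Decidable (Spec_check_groupings_of_same_orientation_py half_layup_indices out) := by unfold Spec_check_groupings_of_same_orientation_py; infer_instance

-- ===== CLAIM (what is proved, stated in full; the proofs are below) =====
def Claim_equal_check_groupings_of_same_orientation_py : Prop := ∀ (half_layup_indices : List Int), Dom_check_groupings_of_same_orientation_py half_layup_indices → Spec_check_groupings_of_same_orientation_py half_layup_indices (check_groupings_of_same_orientation_py half_layup_indices)

-- ===== LEMMAS AND PROOFS =====

-- reference run-length encoding, built front-wise
def pvRle : List Int → List (Int × Int)
  | [] => []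
  | x :: xs =>
    match pvRle xs with
    | (v, n) :: r => if v = x then (x, n + 1) :: r else (x, 1) :: (v, n) :: r
    | [] => [(x, 1)]

-- merge a pending run into the front of an encoding
def pvMerge (p : Int × Int) : List (Int × Int) → List (Int × Int)
  | [] => [p]
  | (w, m) :: t => if p.1 = w then (p.1, p.2 + m) :: t else p :: (w, m) :: t

-- A's counter loop as structural recursion over adjacent pairs
def pvZ : Int × Int → List Int → Int × Int
  | s, [] => s
  | s, [_] => s
  | s, x :: y :: t =>
    pvZ (if x = y then (max s.1 (s.2 + 1), s.2 + 1) else (s.1, 1)) (y :: t)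

lemma pvRle_counts_pos (xs : List Int) : ∀ p ∈ pvRle xs, 1 ≤ p.2 := by
  induction xs with
  | nil => simp [pvRle]
  | cons y ys ih =>
    intro p hp
    rcases h : pvRle ys with _ | ⟨⟨v, n⟩, r⟩
    · simp [pvRle, h] at hp; simp [hp]
    · have hn : 1 ≤ n := ih (v, n) (by rw [h]; exact List.mem_cons_self ..)
      by_cases hv : v = y
      · simp [pvRle, h, hv] at hp
        rcases hp with hp | hp
        · simp [hp]; omega
        · exact ih p (by rw [h]; exact List.mem_cons_of_mem _ hp)
      · simp [pvRle, h, hv] at hp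
        rcases hp with hp | hp | hp
        · simp [hp]
        · simp [hp]; omega
        · exact ih p (by rw [h]; exact List.mem_cons_of_mem _ hp)

lemma pvRle_cons_head (x : Int) (t : List Int) :
    ∃ k r, pvRle (x :: t) = (x, k) :: r ∧ 1 ≤ k := by
  rcases h : pvRle t with _ | ⟨⟨v, n⟩, r⟩
  · exact ⟨1, [], by simp [pvRle, h], le_refl 1⟩
  · have hn : 1 ≤ n := pvRle_counts_pos t (v, n) (by rw [h]; exact List.mem_cons_self ..)
    by_cases hv : v = x
    · exact ⟨n + 1, r, by simp [pvRle, h, hv], by omega⟩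
    · exact ⟨1, (v, n) :: r, by simp [pvRle, h, hv], le_refl 1⟩

lemma pvRle_eq_nil_iff (xs : List Int) : pvRle xs = [] ↔ xs = [] := by
  cases xs with
  | nil => simp [pvRle]
  | cons x t =>
    obtain ⟨k, r, h, -⟩ := pvRle_cons_head x t
    simp [h]

lemma pvRle_sum (xs : List Int) : ((pvRle xs).map (·.2)).sum = (xs.length : Int) := by
  induction xs with
  | nil => simp [pvRle]
  | cons y ys ih =>
    rcases h : pvRle ys with _ | ⟨⟨v, n⟩, r⟩
    · rw [h] at ih; simp at ih
      simp [pvRle, h, ih]; omega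
    · rw [h] at ih; simp at ih
      by_cases hv : v = y <;> simp [pvRle, h, hv] <;> omega

lemma pvRle_const (xs : List Int) (v m : Int) (h : pvRle xs = [(v, m)]) : ∀ y ∈ xs, y = v := by
  induction xs generalizing m with
  | nil => simp
  | cons y ys ih =>
    rcases hr : pvRle ys with _ | ⟨⟨w, n⟩, r⟩
    · have : ys = [] := (pvRle_eq_nil_iff ys).mp hr
      subst this
      simp [pvRle] at h
      simp [h.1]
    · by_cases hw : w = y
      · simp [pvRle, hr, hw] at h
        obtain ⟨⟨h1, h2⟩, h3⟩ := h
        subst h3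
        intro z hz
        rcases List.mem_cons.mp hz with rfl | hz
        · omega
        · exact ih n (by rw [hr, hw, h1]) z hz
      · simp [pvRle, hr, hw] at h

lemma pvMerge_one (x : Int) (xs : List Int) :
    pvMerge (x, 1) (pvRle xs) = pvRle (x :: xs) := by
  rcases h : pvRle xs with _ | ⟨⟨w, m⟩, t⟩
  · simp only [pvRle, h, pvMerge]
  · by_cases hw : w = x
    · subst hw
      simp only [pvRle, h, pvMerge, reduceIte]
      simp; omega
    · have hxw : ¬ x = w := fun hc => hw hc.symm
      simp only [pvRle, h, pvMerge, if_neg hxw, if_neg hw]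

lemma pvMerge_inc (x : Int) (n : Int) (xs : List Int) :
    pvMerge (x, n + 1) (pvRle xs) = pvMerge (x, n) (pvRle (x :: xs)) := by
  rcases h : pvRle xs with _ | ⟨⟨w, m⟩, t⟩
  · have : xs = [] := (pvRle_eq_nil_iff xs).mp h
    subst this
    simp [pvRle, pvMerge]
  · by_cases hw : w = x
    · subst hw
      simp only [pvRle, h, reduceIte, pvMerge]
      simp; omega
    · have hxw : ¬ x = w := fun hc => hw hc.symm
      simp only [pvRle, h, pvMerge, if_neg hxw, if_neg hw]
      simp

lemma pvFoldl_runStep (xs : List Int) : ∀ (r : List (Int × Int)) (v n : Int),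
    List.foldl pvRunStep (r ++ [(v, n)]) xs = r ++ pvMerge (v, n) (pvRle xs) := by
  induction xs with
  | nil => intro r v n; simp [pvRle, pvMerge]
  | cons x t ih =>
    intro r v n
    by_cases hv : v = x
    · subst hv
      have hstep : pvRunStep (r ++ [(v, n)]) v = r ++ [(v, n + 1)] := by
        simp [pvRunStep]
      rw [List.foldl_cons, hstep, ih, pvMerge_inc]
    · have hstep : pvRunStep (r ++ [(v, n)]) x = (r ++ [(v, n)]) ++ [(x, 1)] := by
        simp [pvRunStep, hv]
      rw [List.foldl_cons, hstep, ih, pvMerge_one, List.append_assoc]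
      obtain ⟨k, r', hh, -⟩ := pvRle_cons_head x t
      rw [hh]
      simp [pvMerge, hv]

lemma pvRuns_eq_rle (xs : List Int) : xs.foldl pvRunStep [] = pvRle xs := by
  cases xs with
  | nil => simp [pvRle]
  | cons x t =>
    have : pvRunStep [] x = [(x, 1)] := by simp [pvRunStep]
    rw [List.foldl_cons, this]
    have := pvFoldl_runStep t [] x 1
    simp at this
    rw [this, pvMerge_one]

lemma pvZip_fold (xs : List Int) (init : Int × Int) :
    (xs.zip xs.tail).foldl
      (fun (s : Int × Int) (p : Int × Int) =>
        if p.1 = p.2 then (max s.1 (s.2 + 1), s.2 + 1) else (s.1, 1)) init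
      = pvZ init xs := by
  induction xs generalizing init with
  | nil => simp [pvZ]
  | cons x t ih =>
    cases t with
    | nil => simp [pvZ]
    | cons y t' =>
      simp only [List.tail_cons, List.zip_cons_cons, List.foldl_cons]
      rw [show ((y :: t').zip t') = ((y :: t').zip (y :: t').tail) from rfl, ih]
      simp [pvZ]

lemma pvIndex_fold (xs : List Int) (init : Int × Int) :
    (PySem.List.pyRange 0 (PySem.List.len xs - 1) 1).foldl
      (fun (s : Int × Int) i =>
        if PySem.List.pyGetD xs i 0 = PySem.List.pyGetD xs (i + 1) 0 then
          (max s.1 (s.2 + 1), s.2 + 1)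
        else (s.1, 1)) init
      = pvZ init xs := by
  rcases xs with _ | ⟨a, t⟩
  · rw [PySem.List.pyRange_one_eq_nil (by simp [PySem.List.len])]
    simp [pvZ]
  · have hlen : (PySem.List.len (a :: t) : Int) - 1 = PySem.List.len ((a :: t).zip t) := by
      simp [PySem.List.len]
    rw [hlen]
    have hcongr :
        (PySem.List.pyRange 0 (PySem.List.len ((a :: t).zip t)) 1).foldl
          (fun (s : Int × Int) i =>
            if PySem.List.pyGetD (a :: t) i 0 = PySem.List.pyGetD (a :: t) (i + 1) 0 then
              (max s.1 (s.2 + 1), s.2 + 1)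
            else (s.1, 1)) init
        = (PySem.List.pyRange 0 (PySem.List.len ((a :: t).zip t)) 1).foldl
          (fun (s : Int × Int) j =>
            (fun (s : Int × Int) (p : Int × Int) =>
              if p.1 = p.2 then (max s.1 (s.2 + 1), s.2 + 1) else (s.1, 1)) s
              (PySem.List.pyGetD ((a :: t).zip t) j (0, 0))) init := by
      apply PySem.List.foldl_congr_mem
      intro acc i hi
      have hi' := (PySem.List.mem_pyRange_one).mp hi
      have h0 : 0 ≤ i := hi'.1
      have hzlen : ((a :: t).zip t).length = t.length := by simp
      have hlz : (PySem.List.len ((a :: t).zip t) : Int) = (t.length : Int) := by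
        simp [PySem.List.len]
      have hiz : i < (((a :: t).zip t).length : Int) := by rw [hzlen]; omega
      have hix : i < ((a :: t).length : Int) := by simp; omega
      have hix1 : i + 1 < ((a :: t).length : Int) := by simp; omega
      rw [PySem.List.pyGetD_eq_getElem ((a :: t).zip t) (0, 0) h0 hiz,
          PySem.List.pyGetD_eq_getElem (a :: t) 0 h0 hix,
          PySem.List.pyGetD_eq_getElem (a :: t) 0 (by omega) hix1]
      have hgz : ((a :: t).zip t)[i.toNat]'(by omega)
          = ((a :: t)[i.toNat]'(by omega), t[i.toNat]'(by omega)) := List.getElem_zip ..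
      have hi1 : (i + 1).toNat = i.toNat + 1 := by omega
      have hsucc : (a :: t)[(i + 1).toNat]'(by omega) = t[i.toNat]'(by omega) := by
        simp [hi1]
      rw [hgz, hsucc]
    rw [hcongr, PySem.List.foldl_pyRange_zero_pyGetD ((a :: t).zip t) (0, 0)
        (fun (s : Int × Int) (p : Int × Int) =>
          if p.1 = p.2 then (max s.1 (s.2 + 1), s.2 + 1) else (s.1, 1)) init]
    exact pvZip_fold (a :: t) init

lemma pvZ_spec (t : List Int) : ∀ (x maxc cur : Int), 1 ≤ cur → cur ≤ maxc →
    pvZ (maxc, cur) (x :: t) =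
      (((cur - 1 + (pvRle (x :: t)).headI.2) :: ((pvRle (x :: t)).tail.map (·.2))).foldl max maxc,
       ((cur - 1 + (pvRle (x :: t)).headI.2) :: ((pvRle (x :: t)).tail.map (·.2))).getLastD 0) := by
  induction t with
  | nil =>
    intro x maxc cur h1 h2
    show (maxc, cur) = _
    simp [pvRle]
    omega
  | cons y t' ih =>
    intro x maxc cur h1 h2
    obtain ⟨k, r, hr, hk⟩ := pvRle_cons_head y t'
    have hrle : pvRle (x :: y :: t') = pvMerge (x, 1) ((y, k) :: r) := by
      rw [← pvMerge_one, hr]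
    by_cases hxy : x = y
    · have hstep : pvZ (maxc, cur) (x :: y :: t')
          = pvZ (max maxc (cur + 1), cur + 1) (y :: t') := by
        simp [pvZ, hxy]
      have hrle2 : pvRle (x :: y :: t') = (x, 1 + k) :: r := by
        rw [hrle]; simp [pvMerge, hxy]
      rw [hstep, ih y (max maxc (cur + 1)) (cur + 1) (by omega) (by omega), hr, hrle2]
      simp only [List.headI, List.tail]
      have hhead : cur + 1 - 1 + k = cur - 1 + (1 + k) := by omega
      rw [hhead]
      congr 1
      rw [List.foldl_cons, List.foldl_cons]
      congr 1
      omega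
    · have hstep : pvZ (maxc, cur) (x :: y :: t')
          = pvZ (maxc, 1) (y :: t') := by
        simp [pvZ, hxy]
      have hrle2 : pvRle (x :: y :: t') = (x, 1) :: (y, k) :: r := by
        rw [hrle]; simp [pvMerge, hxy]
      rw [hstep, ih y maxc 1 (by omega) (by omega), hr, hrle2]
      simp only [List.headI, List.tail, List.map_cons]
      congr 1
      · rw [List.foldl_cons, List.foldl_cons, List.foldl_cons]
        congr 1
        omega
      · simp

lemma pvFoldl_max_le (l : List Int) : ∀ a : Int, (l.foldl max a ≤ 4) ↔ (a ≤ 4 ∧ ∀ x ∈ l, x ≤ 4) := by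
  induction l with
  | nil => simp
  | cons x t ih =>
    intro a
    rw [List.foldl_cons, ih]
    constructor
    · rintro ⟨h1, h2⟩
      refine ⟨by omega, ?_⟩
      intro y hy
      rcases List.mem_cons.mp hy with rfl | hy
      · omega
      · exact h2 y hy
    · rintro ⟨h1, h2⟩
      have hx : x ≤ 4 := h2 x (List.mem_cons_self ..)
      exact ⟨by omega, fun y hy => h2 y (List.mem_cons_of_mem _ hy)⟩

lemma pvGetD_neg (l : List Int) (k : Nat) (d : Int) (h1 : 1 ≤ k) (h2 : k ≤ l.length) :
    PySem.List.pyGetD l (-(k : Int)) d = l.getD (l.length - k) d := by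
  simp only [PySem.List.pyGetD, PySem.List.pyGet?, PySem.List.pyIdx?]
  rw [if_neg (by omega), if_pos (by omega)]
  have : (-(-(k : Int))).toNat = k := by omega
  rw [this]
  rw [List.getD_eq_getElem?_getD]
  rfl

lemma pvLast3 (xs : List Int) (h : 3 ≤ xs.length) :
    ((xs.getD (xs.length - 3) 0 = xs.getD (xs.length - 2) 0 ∧
      xs.getD (xs.length - 2) 0 = xs.getD (xs.length - 1) 0) ↔
     3 ≤ ((pvRle xs).map (·.2)).getLastD 0) := by
  induction xs with
  | nil => simp at h
  | cons x t ih =>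
    by_cases ht : 3 ≤ t.length
    · -- step: reduce both sides to t
      have hlhs : ((x :: t).getD ((x :: t).length - 3) 0 = (x :: t).getD ((x :: t).length - 2) 0 ∧
            (x :: t).getD ((x :: t).length - 2) 0 = (x :: t).getD ((x :: t).length - 1) 0)
          ↔ (t.getD (t.length - 3) 0 = t.getD (t.length - 2) 0 ∧
            t.getD (t.length - 2) 0 = t.getD (t.length - 1) 0) := by
        have e3 : (x :: t).length - 3 = (t.length - 3) + 1 := by simp; omega
        have e2 : (x :: t).length - 2 = (t.length - 2) + 1 := by simp; omega
        have e1 : (x :: t).length - 1 = (t.length - 1) + 1 := by simp; omega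
        rw [e3, e2, e1, List.getD_cons_succ, List.getD_cons_succ, List.getD_cons_succ]
      rw [hlhs]
      cases t with
      | nil => simp at ht
      | cons y t' =>
        obtain ⟨k, r, hr, hk⟩ := pvRle_cons_head y t'
        have hrle : pvRle (x :: y :: t') = pvMerge (x, 1) ((y, k) :: r) := by
          rw [← pvMerge_one, hr]
        cases hrv : r with
        | cons p r' =>
          -- last run untouched
          have hrhs : ((pvRle (x :: y :: t')).map (·.2)).getLastD 0
              = ((pvRle (y :: t')).map (·.2)).getLastD 0 := by
            subst hrv
            rw [hrle, hr]
            by_cases hxy : x = y <;> simp [pvMerge, hxy]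
          rw [hrhs]
          exact ih ht
        | nil =>
          -- the whole tail is one constant run of length ≥ 3: both sides are true
          subst hrv
          have hconst : ∀ z ∈ (y :: t'), z = y := pvRle_const (y :: t') y k hr
          have hklen : k = ((y :: t').length : Int) := by
            have := pvRle_sum (y :: t')
            rw [hr] at this
            simpa using this
          have hlen3 : 3 ≤ ((y :: t').length : Int) := by exact_mod_cast ht
          constructor
          · intro _
            rw [hrle]
            by_cases hxy : x = y <;> simp [pvMerge, hxy] <;> omega
          · intro _
            have hget : ∀ j, j < (y :: t').length → (y :: t').getD j 0 = y := by
              intro j hj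
              rw [List.getD_eq_getElem _ _ hj]
              exact hconst _ (List.getElem_mem hj)
            refine ⟨?_, ?_⟩ <;> rw [hget _ (by omega), hget _ (by omega)]
    · -- base: xs has exactly 3 elements
      have hlen : t.length = 2 := by simp at h; omega
      rcases t with _ | ⟨b, tb⟩
      · simp at hlen
      rcases tb with _ | ⟨c, tc⟩
      · simp at hlen
      rcases tc with _ | ⟨d, td⟩
      · have ec : pvRle [c] = [(c, 1)] := rfl
        have e : pvRle [x, b, c] = pvMerge (x, 1) (pvMerge (b, 1) [(c, 1)]) := by
          rw [← pvMerge_one, ← pvMerge_one, ec]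
        rw [e]
        by_cases hbc : b = c
        · subst hbc
          by_cases hxb : x = b <;> simp [pvMerge, hxb]
        · by_cases hxb : x = b <;> simp [pvMerge, hbc, hxb]
      · simp at hlen

lemma pvMain (xs : List Int) :
    check_groupings_of_same_orientation_py xs = check_groupings_of_same_orientation_py_alt xs := by
  cases xs with
  | nil => decide
  | cons a t =>
    obtain ⟨k, r, hr, hk⟩ := pvRle_cons_head a t
    have hkpos := pvRle_counts_pos (a :: t)
    -- abbreviations
    set xs := a :: t with hxs
    set ks : List Int := r.map (·.2) with hks
    have hlens : (pvRle xs).map (·.2) = k :: ks := by rw [hr]; rfl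
    -- A's loop state
    have hst : (PySem.List.pyRange 0 (PySem.List.len xs - 1) 1).foldl
        (fun (s : Int × Int) i =>
          if PySem.List.pyGetD xs i 0 = PySem.List.pyGetD xs (i + 1) 0 then
            (max s.1 (s.2 + 1), s.2 + 1)
          else (s.1, 1)) (1, 1)
        = ((k :: ks).foldl max 1, (k :: ks).getLastD 0) := by
      rw [pvIndex_fold, hxs, pvZ_spec t a 1 1 le_rfl le_rfl, ← hxs, hr]
      simp [hks]
    -- B's run lengths
    have hruns : xs.foldl pvRunStep [] = pvRle xs := pvRuns_eq_rle xs
    -- max check agreement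
    have hmax : ((k :: ks).foldl max 1 ≤ 4) ↔ ((k :: ks).any (fun n => decide (4 < n)) = false) := by
      rw [pvFoldl_max_le]
      simp
    -- lengths sum
    have hsum : (k :: ks).sum = (xs.length : Int) := by rw [← hlens]; exact pvRle_sum xs
    -- last length
    have hlastlen : PySem.List.pyGetD (k :: ks) (-1) 0 = (k :: ks).getLastD 0 := by
      rw [show (-1 : Int) = -((1 : Nat) : Int) from rfl,
          pvGetD_neg (k :: ks) 1 0 le_rfl (by simp)]
      rw [List.getD_eq_getElem?_getD, List.getLastD_eq_getLast?, List.getLast?_eq_getElem?]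
    unfold check_groupings_of_same_orientation_py check_groupings_of_same_orientation_py_alt
    simp only [hst, hruns, hlens, hsum, hlastlen]
    by_cases hP : (k :: ks).foldl max 1 ≤ 4
    · have hany : (k :: ks).any (fun n => decide (4 < n)) = false := hmax.mp hP
      by_cases h3 : 3 ≤ xs.length
      · have hn3 : PySem.List.pyGetD xs (-3) 0 = xs.getD (xs.length - 3) 0 := by
          rw [show (-3 : Int) = -((3 : Nat) : Int) from rfl]; exact pvGetD_neg xs 3 0 (by omega) h3
        have hn2 : PySem.List.pyGetD xs (-2) 0 = xs.getD (xs.length - 2) 0 := by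
          rw [show (-2 : Int) = -((2 : Nat) : Int) from rfl]; exact pvGetD_neg xs 2 0 (by omega) (by omega)
        have hn1 : PySem.List.pyGetD xs (-1) 0 = xs.getD (xs.length - 1) 0 := by
          rw [show (-1 : Int) = -((1 : Nat) : Int) from rfl]; exact pvGetD_neg xs 1 0 (by omega) (by omega)
        have htail := pvLast3 xs h3
        rw [hlens] at htail
        have hsum3 : (3 : Int) ≤ (k :: ks).sum := by rw [hsum]; exact_mod_cast h3
        rw [if_pos h3, hn3, hn2, hn1, hany]
        by_cases htc : (xs.getD (xs.length - 3) 0 = xs.getD (xs.length - 2) 0 ∧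
            xs.getD (xs.length - 2) 0 = xs.getD (xs.length - 1) 0)
        · rw [if_pos htc]
          have hlastv : (3 : Int) ≤ (k :: ks).getLast?.getD 0 := by
            rw [← List.getLastD_eq_getLast?]; exact htail.mp htc
          simp [hlastv, h3]
        · rw [if_neg htc]
          have hlast : ¬ (3 ≤ (k :: ks).getLastD 0) := fun hc => htc (htail.mpr hc)
          simp only [List.foldl_cons] at hP
          simp [hP, h3, -List.getLastD_eq_getLast?, hlast]
      · rw [if_neg h3]
        have hall := (pvFoldl_max_le (k :: ks) 1).mp hP
        simp only [List.foldl_cons] at hP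
        simp [hP, h3]
        exact ⟨hall.2 k (List.mem_cons_self ..), fun x hx => hall.2 x (List.mem_cons_of_mem _ hx)⟩
    · have hany : ¬ ((k :: ks).any (fun n => decide (4 < n)) = false) := fun hc => hP (hmax.mpr hc)
      have hany' : (k :: ks).any (fun n => decide (4 < n)) = true := by
        cases h : (k :: ks).any (fun n => decide (4 < n))
        · exact absurd h hany
        · rfl
      simp only [List.foldl_cons] at hP
      rw [hany']
      by_cases h3 : 3 ≤ xs.length
      · rw [if_pos h3]
        split <;> simp [hP]
      · rw [if_neg h3]
        simp [hP]

-- ===== VERDICT (by name: the statement is the Claim_ definition above) =====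
theorem check_groupings_of_same_orientation_py_spec : Claim_equal_check_groupings_of_same_orientation_py := by
  intro xs _
  unfold Spec_check_groupings_of_same_orientation_py
  exact pvMain xs
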